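-- pv_equiv track=rewrite | github.com/nakato156/pseudocode-interpreter | lexer.py | deleted_comment_line
-- ===== SOURCE A (Python) =====
-- def search_sub_str(str_:str,init:int=0)->str:
--     is_str={"type":"","init":False};
--     i=init;
--     LEN=len(str_);
--     THE_END=False;#Para saber si terminó la cadena.
--     while i<LEN:
--         char=str_[i];
--         if char in "\"'":#Si es un string ("",'')
--                 if is_str["type"]=="":#Es el inicio de la cadena.
--                     is_str["type"]='"' if char=='"' else "'";
--                     is_str["init"]=True;
--                     init=i;
--                 elif char==is_str["type"]:#Si no es un signo de escape(\" o \') entonces se cierra la cadena.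
--                     THE_END=True;
--                     break;
--         if is_str["type"]!="":
--             if char=='\\':#Scapamos cualquier caracter.
--                 i+=1;
--         #Ocurre un error cuando hacen: "hola\\""
--         i+=1;
--     if len(is_str["type"])==0:
--         return "";
--     return {"init":init,"end":i,"THE_END":THE_END};
--
-- def deleted_comment_line(str_:str,is_mult_lineas=False) -> str:
--     """Descripción:
--         [Funcion que pide una cadena y elimina todos los comentarios de esa cadena: del # in str_, pero deja intacto los comentarios dentro de la sub-cadena: imprimir("hola#mundo");#no aparecera -> imprimir("hola#mundo");]
--
--     Arguments:
--         str_ {str} -- [trozo de codigo para eliminar los comentarios.]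
--
--     Keyword Arguments:
--         is_mult_lineas {bool} -- [Permite decidir si se quiere analizar varias lineas o solo una, esto asegura velocidad cuando no es necesario varias lineas.] (default: {False})
--
--     Returns:
--         str -- [Trozo de codigo sin comentarios○.]
--     """
--     init_comment=False;
--     exit_="";
--     i=0;
--     MAX_LEN=len(str_);
--     init_exit=0;
--     while i < MAX_LEN:
--         char=str_[i];
--         if init_comment:
--             if not is_mult_lineas:#Si no necesitamos ver mas de una linea entonces eliminamos.
--                 break;
--
--             if char=='\n':#Si llegamos al final de linea entonces comenzamos otra vez, pero sin reiniciar el bucle.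
--                 init_comment=False;
--                 init_exit=i;
--         else:#Si no es un comentario:
--             if char=='#':#Vemos si es un digito.
--                 init_comment=True;
--                 exit_+=str_[init_exit:i];#Como tenemos el inicio y el fin de la cadena sin los comentarios, lo aprevechamos.
--                 i+=1;
--                 continue;
--
--             if char in "\"'":#Si es un string ("",'')
--                 i=search_sub_str(str_,i)["end"];#Solo necesitamos saber donde termina la linea para no tratar la cadena pasada por el usuario.
--         i+=1;
--     return exit_ if init_comment else exit_+str_[init_exit:i+1];
-- ===== SOURCE B (Python) =====
-- def deleted_comment_line(str_: str, is_mult_lineas=False) -> str: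
--     """Single flat pass with an explicit state machine (NORMAL / IN_STRING / IN_COMMENT),
--     an active-quote variable and an escape flag; kept characters are collected in a list."""
--     NORMAL, IN_STRING, IN_COMMENT = 0, 1, 2
--     state = NORMAL
--     quote = ''
--     escaped = False
--     out = []
--     for char in str_:
--         if state == NORMAL:
--             if char == '#':
--                 state = IN_COMMENT
--             elif char in "\"'":
--                 state = IN_STRING
--                 quote = char
--                 escaped = False
--                 out.append(char)
--             else:
--                 out.append(char)
--         elif state == IN_STRING:
--             out.append(char)
--             if escaped:
--                 escaped = False
--             elif char == '\\':
--                 escaped = True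
--             elif char == quote:
--                 state = NORMAL
--         else:  # IN_COMMENT
--             if is_mult_lineas and char == '\n':
--                 state = NORMAL
--                 out.append(char)
--             # single-line: everything after '#' is dropped
--     return ''.join(out)
-- ===== Notes on version B (the rewrite author's own statement) =====
-- stated objective: simpler
-- what changed: A's index/slice bookkeeping (deferred copying via init_exit slices) and its nested string-scanning helper search_sub_str are replaced by one flat character-by-character pass with an explicit state machine (NORMAL / IN_STRING / IN_COMMENT), an active-quote variable and an escape flag, appending kept characters to a list joined at the end.
import Mathlib
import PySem

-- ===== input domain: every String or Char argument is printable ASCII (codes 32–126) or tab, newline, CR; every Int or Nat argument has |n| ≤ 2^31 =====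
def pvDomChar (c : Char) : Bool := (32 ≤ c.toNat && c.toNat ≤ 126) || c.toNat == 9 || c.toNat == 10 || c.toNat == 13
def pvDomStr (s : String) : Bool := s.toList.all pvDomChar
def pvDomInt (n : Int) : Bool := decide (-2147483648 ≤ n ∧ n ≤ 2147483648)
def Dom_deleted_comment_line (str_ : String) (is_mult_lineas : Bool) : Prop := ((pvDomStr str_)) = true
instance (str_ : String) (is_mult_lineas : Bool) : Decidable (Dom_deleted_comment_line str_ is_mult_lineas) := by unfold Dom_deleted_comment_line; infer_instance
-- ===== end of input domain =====

-- B replaces A's index/slice bookkeeping and its nested string-scanning helper by one flat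
-- character-by-character state machine (simpler decomposition; same O(n) cost).


-- ===== PORT A =====
-- The ports work on `str_.toList : List Char` (PySem strings are defined over List Char).
-- Loop indices are Nat: in A every index starts at 0 and only grows, so this is exact.
-- `pvSlice l a b` is Python's `str_[a:b]` for 0 ≤ a ≤ b (the only way A slices).
def pvSlice (l : List Char) (a b : Nat) : List Char := (l.drop a).take (b - a)

-- search_sub_str's while loop. State: is_str["type"] as `Option Char` ("" ↔ none), init, i.
-- Returns the final (type, init, i, THE_END).  The `break` is the tuple return with THE_END = true.
-- Fuel: one unit per iteration; i grows by ≥ 1 each iteration so `l.length + 1` always suffices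
-- (proved by the invariant `l.length ≤ fuel + i` in the lemmas below).
def searchLoop (l : List Char) : Nat → Option Char → Nat → Nat → (Option Char × Nat × Nat × Bool)
  | 0, t, init, i => (t, init, i, false)
  | fuel + 1, t, init, i =>
    if i < l.length then
      let char := l.getD i ' '
      -- the common tail of the iteration: the escape check `if is_str["type"]!="" and char=='\\'`
      -- followed by `i += 1`
      let step := fun (t' : Option Char) (init' : Nat) =>
        let i' := if t' ≠ none ∧ char = '\\' then i + 1 else i
        searchLoop l fuel t' init' (i' + 1)
      if char = '"' ∨ char = '\'' then
        match t with
        | none => step (some char) i          -- start of the string: type := char, init := i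
        | some q => if char = q then (t, init, i, true)   -- unescaped close: break, THE_END
                    else step t init
      else step t init
    else (t, init, i, false)

-- search_sub_str: Python returns "" when no string started (none here), else the dict
-- {"init":…, "end":…, "THE_END":…} as a triple.
def search_sub_str (l : List Char) (init : Nat) : Option (Nat × Nat × Bool) :=
  match searchLoop l (l.length + 1) none init init with
  | (none, _, _, _) => none
  | (some _, ini, e, f) => some (ini, e, f)

-- deleted_comment_line's while loop; same fuel discipline.
-- Fuel-0 returns the same expression as the i ≥ MAX_LEN exit (never reached with the fuel given).
def aLoop (l : List Char) (m : Bool) : Nat → Bool → List Char → Nat → Nat → List Char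
  | 0, ic, ex, i, ie => if ic then ex else ex ++ pvSlice l ie (i + 1)
  | fuel + 1, ic, ex, i, ie =>
    if i < l.length then
      let char := l.getD i ' '
      if ic then
        if !m then ex                                   -- break; return exit_ (init_comment true)
        else if char = '\n' then aLoop l m fuel false ex (i + 1) i
        else aLoop l m fuel true ex (i + 1) ie
      else
        if char = '#' then
          aLoop l m fuel true (ex ++ pvSlice l ie i) (i + 1) ie   -- i += 1; continue
        else if char = '"' ∨ char = '\'' then
          -- i = search_sub_str(str_, i)["end"]; the none branch is unreachable (l[i] is a quote,
          -- so the helper always returns the dict; Python would raise TypeError otherwise)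
          let j := match search_sub_str l i with | some r => r.2.1 | none => i
          aLoop l m fuel false ex (j + 1) ie
        else aLoop l m fuel false ex (i + 1) ie
    else if ic then ex else ex ++ pvSlice l ie (i + 1)

def deleted_comment_line (str_ : String) (is_mult_lineas : Bool) : String :=
  String.mk (aLoop str_.toList is_mult_lineas (str_.toList.length + 1) false [] 0 0)

-- ===== PORT B =====
-- B's state machine: NORMAL / IN_STRING(quote, escaped) / IN_COMMENT.
inductive BState where
  | normal : BState
  | instr : Char → Bool → BState      -- active quote, escape flag
  | comment : BState
deriving DecidableEq, Repr

-- Source B's `for char in str_` loop: one step per character, emitted chars in order.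
def bLoop (m : Bool) : BState → List Char → List Char
  | _, [] => []
  | .normal, c :: cs =>
    if c = '#' then bLoop m .comment cs
    else if c = '"' ∨ c = '\'' then c :: bLoop m (.instr c false) cs
    else c :: bLoop m .normal cs
  | .instr q esc, c :: cs =>
    c :: (if esc then bLoop m (.instr q false) cs
          else if c = '\\' then bLoop m (.instr q true) cs
          else if c = q then bLoop m .normal cs
          else bLoop m (.instr q esc) cs)
  | .comment, c :: cs =>
    if m ∧ c = '\n' then c :: bLoop m .normal cs else bLoop m .comment cs

def deleted_comment_line_alt (str_ : String) (is_mult_lineas : Bool) : String :=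
  String.mk (bLoop is_mult_lineas .normal str_.toList)

-- ===== PRECONDITION & SPEC =====
def Spec_deleted_comment_line (str_ : String) (is_mult_lineas : Bool) (out : String) : Prop := out = deleted_comment_line_alt str_ is_mult_lineas
instance (str_ : String) (is_mult_lineas : Bool) (out : String) : Decidable (Spec_deleted_comment_line str_ is_mult_lineas out) := by unfold Spec_deleted_comment_line; infer_instance

-- ===== CLAIM (what is proved, stated in full; the proofs are below) =====
def Claim_equal_deleted_comment_line : Prop := ∀ (str_ : String) (is_mult_lineas : Bool), Dom_deleted_comment_line str_ is_mult_lineas → Spec_deleted_comment_line str_ is_mult_lineas (deleted_comment_line str_ is_mult_lineas)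

-- ===== LEMMAS AND PROOFS =====

theorem pvSlice_of_ge {l : List Char} {a b b' : Nat} (hb : l.length ≤ b) (hb' : l.length ≤ b') :
    pvSlice l a b = pvSlice l a b' := by
  unfold pvSlice
  rw [List.take_of_length_le (by simp; omega), List.take_of_length_le (by simp; omega)]

theorem pvSlice_split {l : List Char} {a b c : Nat} (hab : a ≤ b) (hbc : b ≤ c) :
    pvSlice l a c = pvSlice l a b ++ pvSlice l b c := by
  unfold pvSlice
  have h1 : c - a = (b - a) + (c - b) := by omega
  rw [h1, List.take_add, List.drop_drop]
  have h2 : a + (b - a) = b := by omega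
  rw [h2]

theorem pvSlice_cons {l : List Char} {i b : Nat} (hi : i < l.length) (hb : i < b) :
    pvSlice l i b = l.getD i ' ' :: pvSlice l (i + 1) b := by
  unfold pvSlice
  rw [List.drop_eq_getElem_cons hi, List.getD_eq_getElem _ _ hi]
  have h : b - i = (b - (i + 1)) + 1 := by omega
  rw [h, List.take_succ_cons]

theorem pvSlice_self {l : List Char} {a : Nat} : pvSlice l a a = [] := by
  simp [pvSlice]

theorem bLoop_nil {m : Bool} {st : BState} : bLoop m st [] = [] := by
  cases st <;> rfl

theorem bLoop_comment_false {m : Bool} (hm : m = false) (l' : List Char) :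
    bLoop m .comment l' = [] := by
  subst hm
  induction l' with
  | nil => rfl
  | cons c cs ihc => simp [bLoop, ihc]

-- string scan: searchLoop in an open string computes exactly what bLoop emits in IN_STRING state
theorem searchLoop_spec (l : List Char) (m : Bool) (q : Char) (hqq : q = '"' ∨ q = '\'') :
    ∀ (fuel i ini : Nat), l.length ≤ fuel + i →
    ∃ e flag, searchLoop l fuel (some q) ini i = (some q, ini, e, flag) ∧ i ≤ e ∧
      (flag = false → l.length ≤ e) ∧
      bLoop m (.instr q false) (l.drop i) =
        pvSlice l i (e + 1) ++ (if flag then bLoop m .normal (l.drop (e + 1)) else []) := by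
  intro fuel
  induction fuel with
  | zero =>
    intro i ini h
    refine ⟨i, false, rfl, le_refl _, fun _ => by omega, ?_⟩
    rw [List.drop_of_length_le (by omega)]
    simp [bLoop_nil, pvSlice, List.drop_of_length_le (show l.length ≤ i by omega)]
  | succ fuel ih =>
    intro i ini h
    by_cases hi : i < l.length
    · set c := l.getD i ' ' with hc
      have hdrop : l.drop i = c :: l.drop (i + 1) := by
        rw [List.drop_eq_getElem_cons hi, hc, List.getD_eq_getElem _ _ hi]
      by_cases hq : c = '"' ∨ c = '\''
      · by_cases hcq : c = q
        · -- unescaped matching quote: break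
          refine ⟨i, true, ?_, le_refl _, fun hf => by simp at hf, ?_⟩
          · simp only [searchLoop, if_pos hi, ← hc, if_pos hq, if_pos hcq]
          · rw [hdrop]
            have hbs : ¬ c = '\\' := by rcases hq with h' | h' <;> simp [h']
            simp only [bLoop, if_neg hbs, if_pos hcq]
            rw [pvSlice_cons hi (by omega), pvSlice_self]
            simp [hc, List.getD]
        · -- other quote character: plain step
          obtain ⟨e, flag, heq, hle, hflag, hb⟩ := ih (i + 1) ini (by omega)
          refine ⟨e, flag, ?_, by omega, hflag, ?_⟩
          · have hbs : ¬ (some q ≠ none ∧ c = '\\') := by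
              rcases hq with h' | h' <;> simp [h']
            simp only [searchLoop, if_pos hi, ← hc, if_pos hq, if_neg hcq, if_neg hbs]
            exact heq
          · rw [hdrop]
            have hbs : ¬ c = '\\' := by rcases hq with h' | h' <;> simp [h']
            simp only [bLoop, if_neg hbs, if_neg hcq]
            rw [hb, pvSlice_cons hi (by omega)]
            simp [hc, List.getD]
      · by_cases hbs : c = '\\'
        · -- escape: skip the next character
          by_cases hi1 : i + 1 < l.length
          · set d := l.getD (i + 1) ' ' with hd
            have hdrop1 : l.drop (i + 1) = d :: l.drop (i + 2) := by
              rw [List.drop_eq_getElem_cons hi1, hd, List.getD_eq_getElem _ _ hi1]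
            obtain ⟨e, flag, heq, hle, hflag, hb⟩ := ih (i + 2) ini (by omega)
            refine ⟨e, flag, ?_, by omega, hflag, ?_⟩
            · simp only [searchLoop, if_pos hi, ← hc, if_neg hq,
                if_pos (show (some q ≠ none ∧ c = '\\') by simp [hbs])]
              exact heq
            · rw [hdrop, hdrop1]
              simp only [bLoop, if_pos hbs]
              rw [hb, pvSlice_cons hi (by omega), pvSlice_cons hi1 (by omega)]
              simp [hc, hd, List.getD]
          · -- backslash is the last character: searchLoop exits with e = i + 2
            obtain ⟨e, flag, heq, hle, hflag, hb⟩ := ih (i + 2) ini (by omega)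
            refine ⟨e, flag, ?_, by omega, hflag, ?_⟩
            · simp only [searchLoop, if_pos hi, ← hc, if_neg hq,
                if_pos (show (some q ≠ none ∧ c = '\\') by simp [hbs])]
              exact heq
            · have hnil : l.drop (i + 1) = [] := List.drop_of_length_le (by omega)
              rw [hdrop, hnil]
              simp only [bLoop, if_pos hbs]
              rw [pvSlice_cons hi (by omega)]
              have h2 : pvSlice l (i + 1) (e + 1) = [] := by
                simp [pvSlice, List.drop_of_length_le (show l.length ≤ i + 1 by omega)]
              have h3 : l.drop (e + 1) = [] := List.drop_of_length_le (by omega)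
              rw [h2, h3]
              cases flag <;> simp [bLoop, hc, List.getD]
        · -- ordinary character inside the string
          obtain ⟨e, flag, heq, hle, hflag, hb⟩ := ih (i + 1) ini (by omega)
          refine ⟨e, flag, ?_, by omega, hflag, ?_⟩
          · simp only [searchLoop, if_pos hi, ← hc, if_neg hq,
              if_neg (show ¬ (some q ≠ none ∧ c = '\\') by simp [hbs])]
            exact heq
          · rw [hdrop]
            have hcq : ¬ c = q := fun h' => hq (h' ▸ hqq)
            simp only [bLoop, if_neg hbs, if_neg hcq]
            rw [hb, pvSlice_cons hi (by omega)]
            simp [hc, List.getD]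
    · refine ⟨i, false, ?_, le_refl _, fun _ => by omega, ?_⟩
      · simp only [searchLoop, if_neg hi]
      · rw [List.drop_of_length_le (by omega)]
        simp [bLoop_nil, pvSlice, List.drop_of_length_le (show l.length ≤ i by omega)]

-- main loop, comment mode and normal mode together
theorem aLoop_spec (l : List Char) (m : Bool) :
    ∀ (fuel : Nat) (ic : Bool) (ex : List Char) (i ie : Nat), l.length ≤ fuel + i → ie ≤ i →
    aLoop l m fuel ic ex i ie =
      if ic then ex ++ bLoop m .comment (l.drop i)
      else ex ++ pvSlice l ie i ++ bLoop m .normal (l.drop i) := by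
  intro fuel
  induction fuel with
  | zero =>
    intro ic ex i ie h hie
    have hdn : l.drop i = [] := List.drop_of_length_le (by omega)
    simp only [aLoop, hdn, bLoop_nil]
    cases ic
    · rw [pvSlice_of_ge (l := l) (a := ie) (show l.length ≤ i + 1 by omega)
        (show l.length ≤ i by omega)]
      simp
    · simp
  | succ fuel ih =>
    intro ic ex i ie h hie
    by_cases hi : i < l.length
    · set c := l.getD i ' ' with hc
      have hdrop : l.drop i = c :: l.drop (i + 1) := by
        rw [List.drop_eq_getElem_cons hi, hc, List.getD_eq_getElem _ _ hi]
      have hg : l[i]?.getD ' ' = c := by rw [hc]; rfl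
      cases ic
      · -- normal mode
        by_cases hsh : c = '#'
        · rw [show aLoop l m (fuel + 1) false ex i ie
              = aLoop l m fuel true (ex ++ pvSlice l ie i) (i + 1) ie by
            simp only [aLoop, if_pos hi, ← hc, if_pos hsh]; rfl]
          rw [ih true (ex ++ pvSlice l ie i) (i + 1) ie (by omega) (by omega)]
          rw [hdrop]
          simp only [bLoop, if_pos hsh]
          simp
        · by_cases hq : c = '"' ∨ c = '\''
          · -- string: jump via search_sub_str
            have hbs : ¬ c = '\\' := by rcases hq with h' | h' <;> simp [h']
            obtain ⟨e, flag, heq, hle, hflag, hb⟩ :=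
              searchLoop_spec l m c hq l.length (i + 1) i (by omega)
            have hsrch : search_sub_str l i = some (i, e, flag) := by
              unfold search_sub_str
              have h1 : searchLoop l (l.length + 1) none i i
                  = searchLoop l l.length (some c) i (i + 1) := by
                simp only [searchLoop, if_pos hi, ← hc, if_pos hq,
                  if_neg (show ¬ (some c ≠ none ∧ c = '\\') by simp [hbs])]
              rw [h1, heq]
            rw [show aLoop l m (fuel + 1) false ex i ie
                = aLoop l m fuel false ex (e + 1) ie by
              simp only [aLoop, if_pos hi, ← hc, if_neg hsh, if_pos hq, hsrch]; rfl]
            rw [ih false ex (e + 1) ie (by omega) (by omega)]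
            rw [hdrop]
            simp only [bLoop, if_neg hsh, if_pos hq]
            rw [hb, pvSlice_split (l := l) hie (show i ≤ e + 1 by omega),
              pvSlice_cons hi (by omega)]
            by_cases hfl : flag = true
            · simp [hfl, hg]
            · have hfl' : flag = false := by simp at hfl; exact hfl
              have h3 : l.drop (e + 1) = [] :=
                List.drop_of_length_le (by have := hflag hfl'; omega)
              rw [h3, bLoop_nil]
              simp [hfl', hg, bLoop_nil]
          · -- ordinary character
            rw [show aLoop l m (fuel + 1) false ex i ie
                = aLoop l m fuel false ex (i + 1) ie by
              simp only [aLoop, if_pos hi, ← hc, if_neg hsh, if_neg hq]; rfl]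
            rw [ih false ex (i + 1) ie (by omega) (by omega)]
            rw [hdrop]
            simp only [bLoop, if_neg hsh, if_neg hq]
            rw [pvSlice_split (l := l) hie (show i ≤ i + 1 by omega),
              pvSlice_cons hi (by omega), pvSlice_self]
            simp [hg]
      · -- comment mode
        cases hm : m
        · -- single line: break, return ex
          subst hm
          rw [show aLoop l false (fuel + 1) true ex i ie = ex by
            simp only [aLoop, if_pos hi]; rfl]
          simp [bLoop_comment_false rfl]
        · subst hm
          by_cases hnl : c = '\n'
          · rw [show aLoop l true (fuel + 1) true ex i ie
                = aLoop l true fuel false ex (i + 1) i by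
              simp only [aLoop, if_pos hi, ← hc, if_pos hnl]; rfl]
            rw [ih false ex (i + 1) i (by omega) (by omega)]
            rw [hdrop]
            simp [bLoop, hnl, pvSlice_cons hi (show i < i + 1 by omega), pvSlice_self, hg]
          · rw [show aLoop l true (fuel + 1) true ex i ie
                = aLoop l true fuel true ex (i + 1) ie by
              simp only [aLoop, if_pos hi, ← hc, if_neg hnl]; rfl]
            rw [ih true ex (i + 1) ie (by omega) (by omega)]
            rw [hdrop]
            simp [bLoop, hnl]
    · have hdn : l.drop i = [] := List.drop_of_length_le (by omega)
      simp only [aLoop, if_neg hi, hdn, bLoop_nil]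
      cases ic
      · rw [pvSlice_of_ge (l := l) (a := ie) (show l.length ≤ i + 1 by omega)
          (show l.length ≤ i by omega)]
        simp
      · simp

-- ===== VERDICT (by name: the statement is the Claim_ definition above) =====
theorem deleted_comment_line_spec : Claim_equal_deleted_comment_line := by
  intro str_ m _
  unfold Spec_deleted_comment_line deleted_comment_line deleted_comment_line_alt
  rw [aLoop_spec str_.toList m (str_.toList.length + 1) false [] 0 0 (by omega) (le_refl _)]
  simp [pvSlice_self]
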